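-- pv_equiv track=rewrite | github.com/yujinHan97/Algorithm | 프로그래머스 고득점 Kit/완전탐색/모의고사.py | solution
-- ===== SOURCE A (Python) =====
-- def solution(answers):
--     answer = []
--     first = [1, 2, 3, 4, 5]
--     second = [2, 1, 2, 3, 2, 4, 2, 5]
--     third = [3, 3, 1, 1, 2, 2, 4, 4, 5, 5]
--
--     len_first = len(first)
--     len_second = len(second)
--     len_third = len(third)
--
--     a, b, c = 0, 0, 0
--     for i in range(len(answers)):
--         if answers[i] == first[i % len_first]:
--             a += 1
--         if answers[i] == second[i % len_second]:
--             b += 1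
--         if answers[i] == third[i % len_third]:
--             c += 1
--
--     score = [a, b, c]
--     for idx, sc in enumerate(score):
--         if sc == max(score):
--             answer.append(idx+1)
--
--     return answer
-- ===== SOURCE B (Python) =====
-- def solution(answers):
--     # Histogram approach: one pass bucketing answer values by index mod 40
--     # (lcm of the pattern periods), then each pattern's score is read off the
--     # histogram without rescanning the answers.
--     hist = [dict() for _ in range(40)]
--     for i, v in enumerate(answers):
--         d = hist[i % 40]
--         d[v] = d.get(v, 0) + 1
--     patterns = [[1, 2, 3, 4, 5],
--                 [2, 1, 2, 3, 2, 4, 2, 5],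
--                 [3, 3, 1, 1, 2, 2, 4, 4, 5, 5]]
--     scores = [sum(hist[r].get(pat[r % len(pat)], 0) for r in range(40)) for pat in patterns]
--     best = max(scores)
--     return [i + 1 for i, s in enumerate(scores) if s == best]
-- ===== Notes on version B (the rewrite author's own statement) =====
-- stated objective: alternative
-- what changed: Replaces A's per-element comparison against modular-indexed patterns by a value histogram bucketed by index mod 40 (the lcm of the pattern periods) built in one pass, from which each pattern's score is read off by 40 dictionary lookups without rescanning the answers.
import Mathlib
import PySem

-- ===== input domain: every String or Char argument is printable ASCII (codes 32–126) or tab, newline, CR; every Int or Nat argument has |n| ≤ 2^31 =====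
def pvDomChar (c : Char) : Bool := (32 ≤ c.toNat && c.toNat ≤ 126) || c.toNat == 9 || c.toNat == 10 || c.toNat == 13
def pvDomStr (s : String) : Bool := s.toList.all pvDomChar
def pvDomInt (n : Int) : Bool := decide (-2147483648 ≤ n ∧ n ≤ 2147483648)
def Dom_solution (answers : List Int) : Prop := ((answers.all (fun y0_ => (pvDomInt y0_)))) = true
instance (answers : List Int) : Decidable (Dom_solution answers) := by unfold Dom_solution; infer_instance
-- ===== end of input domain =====

-- B replaces A's interleaved per-element pattern comparisons by a value histogram
-- bucketed by index mod 40 (lcm of the pattern periods); scores are read off the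
-- histogram by 40 lookups per pattern (alternative data structure, same cost).

-- ===== PORT A =====
def solution (answers : List Int) : List Int :=
  let first : List Int := [1, 2, 3, 4, 5]
  let second : List Int := [2, 1, 2, 3, 2, 4, 2, 5]
  let third : List Int := [3, 3, 1, 1, 2, 2, 4, 4, 5, 5]
  let lenFirst : Int := PySem.List.len first
  let lenSecond : Int := PySem.List.len second
  let lenThird : Int := PySem.List.len third
  let abc : Int × Int × Int :=
    (PySem.List.pyRange 0 (PySem.List.len answers) 1).foldl
      (fun (s : Int × Int × Int) i =>
        let a := if PySem.List.pyGetD answers i 0 = PySem.List.pyGetD first (PySem.Int.mod i lenFirst) 0 then s.1 + 1 else s.1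
        let b := if PySem.List.pyGetD answers i 0 = PySem.List.pyGetD second (PySem.Int.mod i lenSecond) 0 then s.2.1 + 1 else s.2.1
        let c := if PySem.List.pyGetD answers i 0 = PySem.List.pyGetD third (PySem.Int.mod i lenThird) 0 then s.2.2 + 1 else s.2.2
        (a, b, c)) (0, 0, 0)
  let score : List Int := [abc.1, abc.2.1, abc.2.2]
  (PySem.List.enumerate score 0).foldl
    (fun answer p => if p.2 = (PySem.List.max? score (fun y => y)).getD 0 then answer ++ [p.1 + 1] else answer) []

-- ===== PORT B =====
-- 'd = hist[i % 40]; d[v] = d.get(v, 0) + 1' mutates the list cell in place;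
-- ported as List.set at the same index i % 40 (always nonnegative and < 40,
-- so .toNat and .set are exact here).
def solution_alt (answers : List Int) : List Int :=
  let hist0 : List (PySem.Dict Int Int) := List.replicate 40 PySem.Dict.empty
  let hist := (PySem.List.enumerate answers 0).foldl
    (fun h (p : Int × Int) =>
      let d := PySem.List.pyGetD h (PySem.Int.mod p.1 40) PySem.Dict.empty
      h.set (PySem.Int.mod p.1 40).toNat (PySem.Dict.insert d p.2 (PySem.Dict.getD d p.2 0 + 1))) hist0
  let patterns : List (List Int) := [[1, 2, 3, 4, 5], [2, 1, 2, 3, 2, 4, 2, 5], [3, 3, 1, 1, 2, 2, 4, 4, 5, 5]]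
  let scores : List Int := patterns.map (fun pat =>
    ((PySem.List.pyRange 0 40 1).map (fun r =>
      PySem.Dict.getD (PySem.List.pyGetD hist r PySem.Dict.empty)
        (PySem.List.pyGetD pat (PySem.Int.mod r (PySem.List.len pat)) 0) 0)).sum)
  let best := (PySem.List.max? scores (fun y => y)).getD 0
  (PySem.List.enumerate scores 0).filterMap (fun p => if p.2 = best then some (p.1 + 1) else none)

-- ===== PRECONDITION & SPEC =====
def Spec_solution (answers : List Int) (out : List Int) : Prop := out = solution_alt answers
instance (answers : List Int) (out : List Int) : Decidable (Spec_solution answers out) := by unfold Spec_solution; infer_instance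

-- ===== CLAIM =====
def Claim_equal_solution : Prop := ∀ (answers : List Int), Dom_solution answers → Spec_solution answers (solution answers)

-- ===== LEMMAS AND PROOFS =====

-- proof-only reference count: matches of ans against pat cycled from offset j
def cnt (pat : List Int) : List Int → Nat → Int
  | [], _ => 0
  | a :: as, j => (if a = pat.getD (j % pat.length) 0 then 1 else 0) + cnt pat as (j + 1)

theorem abc_split (answers p1 p2 p3 : List Int) :
    ∀ (l : List Int) (a b c : Int),
      l.foldl (fun (s : Int × Int × Int) i =>
          (if PySem.List.pyGetD answers i 0 = PySem.List.pyGetD p1 (PySem.Int.mod i (PySem.List.len p1)) 0 then s.1 + 1 else s.1,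
           if PySem.List.pyGetD answers i 0 = PySem.List.pyGetD p2 (PySem.Int.mod i (PySem.List.len p2)) 0 then s.2.1 + 1 else s.2.1,
           if PySem.List.pyGetD answers i 0 = PySem.List.pyGetD p3 (PySem.Int.mod i (PySem.List.len p3)) 0 then s.2.2 + 1 else s.2.2)) (a, b, c)
        = (l.foldl (fun (a : Int) i => if PySem.List.pyGetD answers i 0 = PySem.List.pyGetD p1 (PySem.Int.mod i (PySem.List.len p1)) 0 then a + 1 else a) a,
           l.foldl (fun (b : Int) i => if PySem.List.pyGetD answers i 0 = PySem.List.pyGetD p2 (PySem.Int.mod i (PySem.List.len p2)) 0 then b + 1 else b) b,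
           l.foldl (fun (c : Int) i => if PySem.List.pyGetD answers i 0 = PySem.List.pyGetD p3 (PySem.Int.mod i (PySem.List.len p3)) 0 then c + 1 else c) c) := by
  intro l
  induction l with
  | nil => intro a b c; rfl
  | cons x xs ih => intro a b c; simp only [List.foldl]; rw [ih]

theorem range_cnt (pat : List Int) :
    ∀ (ans : List Int) (j : Nat),
      (((List.range ans.length).countP
          (fun k => decide (ans.getD k 0 = pat.getD ((j + k) % pat.length) 0)) : Nat) : Int)
        = cnt pat ans j := by
  intro ans
  induction ans with
  | nil => intro j; simp [cnt]
  | cons a as ih =>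
    intro j
    have h1 : ((fun k => decide ((a :: as).getD k 0 = pat.getD ((j + k) % pat.length) 0)) ∘ Nat.succ)
        = (fun k => decide (as.getD k 0 = pat.getD (((j + 1) + k) % pat.length) 0)) := by
      funext k
      have hjk : j + Nat.succ k = (j + 1) + k := by omega
      simp [Function.comp, hjk]
    rw [List.length_cons, List.range_succ_eq_map, List.countP_cons, List.countP_map, h1,
      Nat.cast_add, ih (j + 1)]
    simp only [cnt, List.getD_cons_zero, Nat.add_zero, decide_eq_true_eq]
    split_ifs <;> omega

-- A-side: the 'if match then +1' fold over range(len(answers)) equals cnt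
theorem foldl_count_eq_cnt (pat : List Int) (answers : List Int) :
    (PySem.List.pyRange 0 (PySem.List.len answers) 1).foldl
      (fun (a : Int) i =>
        if PySem.List.pyGetD answers i 0
            = PySem.List.pyGetD pat (PySem.Int.mod i (PySem.List.len pat)) 0 then a + 1 else a) 0
      = cnt pat answers 0 := by
  rw [PySem.List.foldl_ite_add_one, ← range_cnt pat answers 0, Int.zero_add]
  congr 1
  rw [PySem.List.pyRange_one]
  simp only [PySem.List.len_eq, Int.sub_zero, Int.toNat_natCast, List.countP_map]
  apply List.countP_congr
  intro k _
  simp only [Function.comp, Int.zero_add]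
  have hmod : PySem.Int.mod (k : Int) ((pat.length : Nat) : Int) = (((k % pat.length : Nat)) : Int) :=
    PySem.Int.mod_natCast k pat.length
  rw [hmod, PySem.List.pyGetD_natCast, PySem.List.pyGetD_natCast]
  simp [List.getD_eq_getElem?_getD]

-- ---- B-side machinery: a finite sum Σ_{r<n} F r, and the histogram invariant ----

def S (F : Nat → Int) : Nat → Int
  | 0 => 0
  | n + 1 => S F n + F n

theorem S_congr (F G : Nat → Int) : ∀ n, (∀ r, r < n → F r = G r) → S F n = S G n := by
  intro n
  induction n with
  | zero => intro _; rfl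
  | succ n ih =>
    intro h
    simp only [S, ih (fun r hr => h r (by omega)), h n (by omega)]

theorem S_update (F G : Nat → Int) (j : Nat) :
    ∀ n, j < n → (∀ r, r < n → r ≠ j → F r = G r) → S F n = S G n + (F j - G j) := by
  intro n
  induction n with
  | zero => intro h _; exact absurd h (Nat.not_lt_zero j)
  | succ n ih =>
    intro hj h
    by_cases hjn : j = n
    · subst hjn
      have hS : S F j = S G j := S_congr F G j (fun r hr => h r (by omega) (by omega))
      simp only [S]; rw [hS]; ring
    · have hih := ih (by omega) (fun r hr hrj => h r (by omega) hrj)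
      simp only [S]; rw [hih, h n (by omega) (fun he => hjn he.symm)]; ring

theorem sum_map_range_eq_S (F : Nat → Int) : ∀ n, ((List.range n).map F).sum = S F n := by
  intro n
  induction n with
  | zero => rfl
  | succ n ih => rw [List.range_succ, List.map_append, List.sum_append]; simp [S, ih]

-- one Python step 'hist[i%40][v] = hist[i%40].get(v,0)+1' shifts the score sum
-- by 1 exactly when v matches the pattern's value at residue i%40
theorem S_step (key : Nat → Int) (h : List (PySem.Dict Int Int)) (hlen : h.length = 40)
    (j : Nat) (hj : j < 40) (v : Int) :
    S (fun r => PySem.Dict.getD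
        ((h.set j (PySem.Dict.insert (h.getD j PySem.Dict.empty) v
            (PySem.Dict.getD (h.getD j PySem.Dict.empty) v 0 + 1))).getD r PySem.Dict.empty)
        (key r) 0) 40
      = S (fun r => PySem.Dict.getD (h.getD r PySem.Dict.empty) (key r) 0) 40
        + (if v = key j then 1 else 0) := by
  rw [S_update _ _ j 40 hj]
  · congr 1
    rw [List.getD_eq_getElem?_getD, List.getElem?_set_self (by omega), Option.getD_some,
      PySem.Dict.getD_insert]
    split_ifs with h1 h2 h2
    · rw [h1]; ring
    · exact absurd h1.symm h2
    · exact absurd h2.symm h1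
    · ring
  · intro r _ hrj
    rw [List.getD_eq_getElem?_getD, List.getElem?_set_ne (fun he => hrj he.symm),
      ← List.getD_eq_getElem?_getD]

-- the histogram fold over enumerate equals cnt, for any pattern whose period divides 40
theorem hist_cnt (pat : List Int) (hdvd : pat.length ∣ 40) :
    ∀ (ans : List Int) (j : Nat) (h : List (PySem.Dict Int Int)), h.length = 40 →
      S (fun r => PySem.Dict.getD
          (((PySem.List.enumerate ans (j : Int)).foldl
              (fun h (p : Int × Int) =>
                h.set (PySem.Int.mod p.1 40).toNat
                  (PySem.Dict.insert (PySem.List.pyGetD h (PySem.Int.mod p.1 40) PySem.Dict.empty) p.2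
                    (PySem.Dict.getD (PySem.List.pyGetD h (PySem.Int.mod p.1 40) PySem.Dict.empty) p.2 0 + 1))) h).getD r PySem.Dict.empty)
          (pat.getD (r % pat.length) 0) 0) 40
        = S (fun r => PySem.Dict.getD (h.getD r PySem.Dict.empty) (pat.getD (r % pat.length) 0) 0) 40
          + cnt pat ans j := by
  intro ans
  induction ans with
  | nil => intro j h hlen; simp [PySem.List.enumerate_nil, cnt]
  | cons a as ih =>
    intro j h hlen
    rw [PySem.List.enumerate_cons, List.foldl_cons]
    have hmod : PySem.Int.mod ((j : Nat) : Int) 40 = (((j % 40 : Nat)) : Int) :=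
      PySem.Int.mod_natCast j 40
    have hj40 : j % 40 < 40 := Nat.mod_lt j (by omega)
    have hcast : ((j : Int) + 1) = (((j + 1 : Nat)) : Int) := by push_cast; ring
    simp only [hmod, hcast, PySem.List.pyGetD_natCast, Int.toNat_natCast]
    rw [ih (j + 1) _ (by rw [List.length_set]; exact hlen)]
    rw [S_step (fun r => pat.getD (r % pat.length) 0) h hlen (j % 40) hj40 a]
    have hkey : pat.getD ((j % 40) % pat.length) 0 = pat.getD (j % pat.length) 0 := by
      rw [Nat.mod_mod_of_dvd j hdvd]
    rw [hkey]
    simp only [cnt]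
    ring

-- score of the initial all-empty histogram is 0
theorem S_empty (key : Nat → Int) :
    S (fun r => PySem.Dict.getD
        ((List.replicate 40 (PySem.Dict.empty : PySem.Dict Int Int)).getD r PySem.Dict.empty)
        (key r) 0) 40 = 0 := by
  rw [S_congr _ (fun _ => 0) 40]
  · decide
  · intro r hr
    rw [List.getD_eq_getElem?_getD, List.getElem?_replicate_of_lt (by omega), Option.getD_some,
      PySem.Dict.getD_empty]

-- B's pyRange-form score equals the S-form over Nat residues
theorem score_pyRange_eq_S (pat : List Int) (hist : List (PySem.Dict Int Int)) :
    ((PySem.List.pyRange 0 40 1).map (fun r =>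
        PySem.Dict.getD (PySem.List.pyGetD hist r PySem.Dict.empty)
          (PySem.List.pyGetD pat (PySem.Int.mod r (PySem.List.len pat)) 0) 0)).sum
      = S (fun r => PySem.Dict.getD (hist.getD r PySem.Dict.empty)
          (pat.getD (r % pat.length) 0) 0) 40 := by
  rw [PySem.List.pyRange_one, List.map_map, ← sum_map_range_eq_S]
  congr 1
  apply List.map_congr_left
  intro k hk
  simp only [Function.comp, Int.zero_add]
  have hmod : PySem.Int.mod (k : Int) ((pat.length : Nat) : Int) = (((k % pat.length : Nat)) : Int) :=
    PySem.Int.mod_natCast k pat.length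
  simp only [PySem.List.len_eq] at *
  rw [hmod, PySem.List.pyGetD_natCast, PySem.List.pyGetD_natCast]

-- B's per-pattern histogram score equals cnt
theorem score_alt_eq (pat : List Int) (hdvd : pat.length ∣ 40) (answers : List Int) :
    ((PySem.List.pyRange 0 40 1).map (fun r =>
        PySem.Dict.getD (PySem.List.pyGetD
            ((PySem.List.enumerate answers 0).foldl
              (fun h (p : Int × Int) =>
                h.set (PySem.Int.mod p.1 40).toNat
                  (PySem.Dict.insert (PySem.List.pyGetD h (PySem.Int.mod p.1 40) PySem.Dict.empty) p.2
                    (PySem.Dict.getD (PySem.List.pyGetD h (PySem.Int.mod p.1 40) PySem.Dict.empty) p.2 0 + 1)))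
              (List.replicate 40 PySem.Dict.empty)) r PySem.Dict.empty)
          (PySem.List.pyGetD pat (PySem.Int.mod r (PySem.List.len pat)) 0) 0)).sum
      = cnt pat answers 0 := by
  rw [score_pyRange_eq_S]
  have h := hist_cnt pat hdvd answers 0 (List.replicate 40 PySem.Dict.empty) (by simp)
  simp only [Nat.cast_zero] at h
  rw [h, S_empty (fun r => pat.getD (r % pat.length) 0), Int.zero_add]

-- ===== VERDICT =====
theorem solution_spec : Claim_equal_solution := by
  intro answers _
  unfold Spec_solution solution solution_alt
  simp only [List.map_cons, List.map_nil]
  rw [abc_split, foldl_count_eq_cnt [1, 2, 3, 4, 5],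
    foldl_count_eq_cnt [2, 1, 2, 3, 2, 4, 2, 5],
    foldl_count_eq_cnt [3, 3, 1, 1, 2, 2, 4, 4, 5, 5]]
  simp only [score_alt_eq [1, 2, 3, 4, 5] (by decide) answers,
    score_alt_eq [2, 1, 2, 3, 2, 4, 2, 5] (by decide) answers,
    score_alt_eq [3, 3, 1, 1, 2, 2, 4, 4, 5, 5] (by decide) answers]
  simp only [PySem.List.enumerate_cons, PySem.List.enumerate_nil, List.foldl_cons, List.foldl_nil,
    List.filterMap_cons, List.filterMap_nil, PySem.List.max?_id_cons, Option.getD_some]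
  split_ifs <;> simp
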